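-- pv_equiv track=rewrite | github.com/borhen68/phantom | core/skill_catalog.py | _first_paragraph
-- ===== SOURCE A (Python) =====
-- def _first_paragraph(lines: list[str]) -> str:
--     paragraph: list[str] = []
--     for line in lines:
--         stripped = line.strip()
--         if not stripped:
--             if paragraph:
--                 break
--             continue
--         if stripped.startswith(("- ", "* ")):
--             continue
--         paragraph.append(stripped)
--     return " ".join(paragraph).strip()
-- ===== SOURCE B (Python) =====
-- def _first_paragraph(lines: list[str]) -> str:
--     # Phase 1: split into runs of stripped non-blank lines (blank lines separate runs).
--     runs: list[list[str]] = []
--     current: list[str] = []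
--     for line in lines:
--         stripped = line.strip()
--         if stripped:
--             current.append(stripped)
--         elif current:
--             runs.append(current)
--             current = []
--     if current:
--         runs.append(current)
--     # Phase 2: first run with any non-list-item content is the paragraph.
--     for run in runs:
--         content = [s for s in run if not s.startswith(("- ", "* "))]
--         if content:
--             return " ".join(content).strip()
--     return ""
-- ===== Notes on version B (the rewrite author's own statement) =====
-- stated objective: alternative
-- what changed: Replaces A's single accumulator loop with break-on-blank-after-content by a two-phase decomposition: split the lines into blank-separated runs, then return the first run whose non-list-item content is non-empty.
import Mathlib
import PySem

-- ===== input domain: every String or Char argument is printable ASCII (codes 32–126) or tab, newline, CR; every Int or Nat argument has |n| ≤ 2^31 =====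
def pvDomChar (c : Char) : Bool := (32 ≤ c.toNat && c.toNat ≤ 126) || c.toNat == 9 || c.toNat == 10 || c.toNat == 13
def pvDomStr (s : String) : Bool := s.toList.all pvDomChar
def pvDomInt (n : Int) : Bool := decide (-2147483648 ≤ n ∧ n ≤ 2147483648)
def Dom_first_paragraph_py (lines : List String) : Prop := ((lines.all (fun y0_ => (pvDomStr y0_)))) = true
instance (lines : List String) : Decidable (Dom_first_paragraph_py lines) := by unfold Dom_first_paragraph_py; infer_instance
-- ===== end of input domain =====

-- B replaces A's single accumulator loop (blank line breaks only once content exists) by a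
-- two-phase decomposition: split into blank-separated runs, then return the first run with
-- non-list-item content (objective: alternative/idiomatic; same cost).

-- ===== PORT A =====
-- the for-loop of A: state = accumulated paragraph; returns the final paragraph list
def fpLoopA : List String → List String → List String
  | [], para => para
  | l :: ls, para =>
    let stripped := PySem.Str.strip l
    if stripped = "" then
      (if para ≠ [] then para else fpLoopA ls para)     -- break / continue
    else if PySem.Str.startswith stripped "- " || PySem.Str.startswith stripped "* " then
      fpLoopA ls para
    else
      fpLoopA ls (para ++ [stripped])

def first_paragraph_py (lines : List String) : String :=
  PySem.Str.strip (PySem.Str.join " " (fpLoopA lines []))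

-- ===== PORT B =====
-- phase 1 of B: split into runs of stripped non-blank lines
def fpRuns : List String → List String → List (List String)
  | [], current => if current ≠ [] then [current] else []
  | l :: ls, current =>
    let stripped := PySem.Str.strip l
    if stripped ≠ "" then fpRuns ls (current ++ [stripped])
    else if current ≠ [] then current :: fpRuns ls []
    else fpRuns ls []

-- B's comprehension predicate: keep s iff not a list item
def fpKeep (s : String) : Bool :=
  ¬ (PySem.Str.startswith s "- " || PySem.Str.startswith s "* ")

-- phase 2 of B: first run with non-list-item content
def fpScan : List (List String) → String
  | [] => ""
  | run :: rs =>
    let content := run.filter fpKeep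
    if content ≠ [] then PySem.Str.strip (PySem.Str.join " " content) else fpScan rs

def first_paragraph_py_alt (lines : List String) : String :=
  fpScan (fpRuns lines [])

-- ===== PRECONDITION & SPEC =====
def Spec_first_paragraph_py (lines : List String) (out : String) : Prop := out = first_paragraph_py_alt lines
instance (lines : List String) (out : String) : Decidable (Spec_first_paragraph_py lines out) := by unfold Spec_first_paragraph_py; infer_instance

-- ===== CLAIM (what is proved, stated in full; the proofs are below) =====
def Claim_equal_first_paragraph_py : Prop := ∀ (lines : List String), Dom_first_paragraph_py lines → Spec_first_paragraph_py lines (first_paragraph_py lines)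

-- ===== LEMMAS AND PROOFS =====

-- one-step unfolding lemmas for the three branch shapes of A's loop
theorem fpLoopA_blank (l : String) (ls para : List String) (h : PySem.Str.strip l = "") :
    fpLoopA (l :: ls) para = if para ≠ [] then para else fpLoopA ls para := by
  rw [fpLoopA]; simp [h]

theorem fpLoopA_skip (l : String) (ls para : List String) (h1 : ¬ PySem.Str.strip l = "")
    (h2 : (PySem.Str.startswith (PySem.Str.strip l) "- " || PySem.Str.startswith (PySem.Str.strip l) "* ") = true) :
    fpLoopA (l :: ls) para = fpLoopA ls para := by
  rw [fpLoopA]; simp only [if_neg h1]; rw [if_pos h2]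

theorem fpLoopA_keep (l : String) (ls para : List String) (h1 : ¬ PySem.Str.strip l = "")
    (h2 : (PySem.Str.startswith (PySem.Str.strip l) "- " || PySem.Str.startswith (PySem.Str.strip l) "* ") = false) :
    fpLoopA (l :: ls) para = fpLoopA ls (para ++ [PySem.Str.strip l]) := by
  rw [fpLoopA]; simp only [if_neg h1]; rw [if_neg (by simp only [h2]; simp)]

-- one-step unfolding lemmas for B's run splitter
theorem fpRuns_nonblank (l : String) (ls cur : List String) (h : ¬ PySem.Str.strip l = "") :
    fpRuns (l :: ls) cur = fpRuns ls (cur ++ [PySem.Str.strip l]) := by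
  rw [fpRuns]; rw [if_pos (by simpa using h)]

theorem fpRuns_blank_cons (l : String) (ls cur : List String) (h : PySem.Str.strip l = "")
    (hc : cur ≠ []) : fpRuns (l :: ls) cur = cur :: fpRuns ls [] := by
  rw [fpRuns]; rw [if_neg (by simpa using h), if_pos hc]

theorem fpRuns_blank_nil (l : String) (ls : List String) (h : PySem.Str.strip l = "") :
    fpRuns (l :: ls) [] = fpRuns ls [] := by
  rw [fpRuns]; rw [if_neg (by simpa using h), if_neg (by simp)]

-- one-step unfolding lemmas for B's scan
theorem fpScan_take (run : List String) (rs : List (List String))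
    (h : run.filter fpKeep ≠ []) :
    fpScan (run :: rs) = PySem.Str.strip (PySem.Str.join " " (run.filter fpKeep)) := by
  rw [fpScan]; rw [if_pos h]

theorem fpScan_skip (run : List String) (rs : List (List String))
    (h : run.filter fpKeep = []) : fpScan (run :: rs) = fpScan rs := by
  rw [fpScan]; rw [if_neg (by simpa using h)]

-- core invariant: A's loop from state (current.filter fpKeep) agrees with B's
-- run-splitting/scanning from state current
theorem fp_invariant (ls : List String) : ∀ current : List String,
    PySem.Str.strip (PySem.Str.join " " (fpLoopA ls (current.filter fpKeep)))
      = fpScan (fpRuns ls current) := by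
  induction ls with
  | nil =>
    intro current
    simp only [fpLoopA, fpRuns]
    by_cases hc : current = []
    · subst hc
      rw [if_neg (by simp)]
      simp only [List.filter_nil, fpScan]
      decide
    · rw [if_pos (by simpa using hc)]
      by_cases hf : current.filter fpKeep = []
      · rw [fpScan_skip _ _ hf, hf]
        simp only [fpScan]
        decide
      · rw [fpScan_take _ _ hf]
  | cons l ls ih =>
    intro current
    by_cases hs : PySem.Str.strip l = ""
    · -- blank line
      rw [fpLoopA_blank l ls _ hs]
      by_cases hc : current = []
      · -- empty run so far: both just continue
        subst hc
        rw [fpRuns_blank_nil l ls hs]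
        simp only [List.filter_nil]
        rw [if_neg (by simp)]
        simpa using ih []
      · rw [fpRuns_blank_cons l ls current hs hc]
        by_cases hf : current.filter fpKeep = []
        · -- paragraph still empty: A continues, B closes a contentless run
          rw [hf, if_neg (by simp), fpScan_skip _ _ hf]
          simpa using ih []
        · -- paragraph non-empty: A breaks, B returns this run's content
          rw [if_pos (by simpa using hf), fpScan_take _ _ hf]
    · -- non-blank line
      by_cases hk : (PySem.Str.startswith (PySem.Str.strip l) "- "
            || PySem.Str.startswith (PySem.Str.strip l) "* ") = true
      · -- list item: A skips it, B's filter drops it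
        rw [fpLoopA_skip l ls _ hs hk, fpRuns_nonblank l ls current hs]
        have h2 := ih (current ++ [PySem.Str.strip l])
        have hkv : fpKeep (PySem.Str.strip l) = false := by unfold fpKeep; rw [hk]; decide
        rwa [List.filter_append, List.filter_singleton, hkv, cond_false,
            List.append_nil] at h2
      · -- kept line: both append it
        have hk' : (PySem.Str.startswith (PySem.Str.strip l) "- "
              || PySem.Str.startswith (PySem.Str.strip l) "* ") = false := by
          simpa using hk
        rw [fpLoopA_keep l ls _ hs hk', fpRuns_nonblank l ls current hs]
        have hkv : fpKeep (PySem.Str.strip l) = true := by unfold fpKeep; rw [hk']; decide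
        have hfilter : List.filter fpKeep (current ++ [PySem.Str.strip l])
            = List.filter fpKeep current ++ [PySem.Str.strip l] := by
          rw [List.filter_append, List.filter_singleton, hkv, cond_true]
        rw [← hfilter]
        exact ih (current ++ [PySem.Str.strip l])

-- ===== VERDICT (by name: the statement is the Claim_ definition above) =====
theorem first_paragraph_py_spec : Claim_equal_first_paragraph_py := by
  intro lines _
  unfold Spec_first_paragraph_py first_paragraph_py first_paragraph_py_alt
  simpa using fp_invariant lines []
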